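-- pv_equiv track=rewrite | github.com/wilmurillo-ai/Design-Assistant | .skills/openclaw-skills/skills/and3rn3t/apple-music-dj/scripts/strategy_engine.py | sequence_tracks
-- ===== SOURCE A (Python) =====
-- from collections import Counter
--
-- def sequence_tracks(tracks: list[dict], max_same_artist: int = 5) -> list[dict]:
--     """Reorder tracks to follow the arc pattern and enforce spacing rules.
--
--     Rules:
--     - No artist repeat within max_same_artist tracks
--     - Max 2 songs from same album
--     - Builds a gentle arc: familiar opener → build → core → wind down
--     """
--     if len(tracks) <= 3:
--         return tracks
--
--     # Enforce album cap: max 2 per album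
--     album_counts: Counter = Counter()
--     filtered = []
--     for t in tracks:
--         album = t.get("album", "")
--         if album and album_counts[album] >= 2:
--             continue
--         album_counts[album] += 1
--         filtered.append(t)
--
--     # Greedy scheduling with artist spacing
--     result = []
--     remaining = list(filtered)
--     recent_artists: list[str] = []
--
--     while remaining:
--         placed = False
--         for i, track in enumerate(remaining):
--             artist = track.get("artist", "")
--             if artist not in recent_artists[-max_same_artist:]:
--                 result.append(remaining.pop(i))
--                 recent_artists.append(artist)
--                 placed = True
--                 break
--         if not placed:
--             # Can't satisfy spacing — just append next
--             result.append(remaining.pop(0))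
--             recent_artists.append(result[-1].get("artist", ""))
--
--     return result
-- ===== SOURCE B (Python) =====
-- def sequence_tracks(tracks: list[dict], max_same_artist: int = 5) -> list[dict]:
--     if len(tracks) <= 3:
--         return tracks
--
--     # Album cap: keep only the first two tracks of each named album
--     album_counts = {}
--     filtered = []
--     for t in tracks:
--         album = t.get("album", "")
--         c = album_counts.get(album, 0)
--         if album and c >= 2:
--             continue
--         album_counts[album] = c + 1
--         filtered.append(t)
--
--     # Group the tracks into per-artist FIFO queues, remembering positions
--     queues = {}  # artist -> list of (position, track), positions increasing
--     for pos, t in enumerate(filtered):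
--         queues.setdefault(t.get("artist", ""), []).append((pos, t))
--
--     # Greedy scheduling: at each step pick, among the queue heads, the
--     # eligible one (artist outside the recent window) with the smallest
--     # original position; if every artist is blocked, the smallest overall.
--     result = []
--     recent = []
--     n = len(filtered)
--     while n:
--         window = recent[-max_same_artist:]
--         best = None   # (pos, artist) among eligible heads
--         first = None  # (pos, artist) among all heads
--         for artist, q in queues.items():
--             if not q:
--                 continue
--             pos = q[0][0]
--             if first is None or pos < first[0]:
--                 first = (pos, artist)
--             if artist not in window and (best is None or pos < best[0]):
--                 best = (pos, artist)
--         pos, artist = best if best is not None else first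
--         result.append(queues[artist].pop(0)[1])
--         recent.append(artist)
--         n -= 1
--     return result
-- ===== Notes on version B (the rewrite author's own statement) =====
-- stated objective: faster
-- what changed: A rescans the whole remaining track list from the front on every placement; B builds per-artist FIFO queues once (with original positions) and each step picks the minimum-position eligible queue head, scanning one entry per distinct artist instead of one per remaining track.
import Mathlib
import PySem

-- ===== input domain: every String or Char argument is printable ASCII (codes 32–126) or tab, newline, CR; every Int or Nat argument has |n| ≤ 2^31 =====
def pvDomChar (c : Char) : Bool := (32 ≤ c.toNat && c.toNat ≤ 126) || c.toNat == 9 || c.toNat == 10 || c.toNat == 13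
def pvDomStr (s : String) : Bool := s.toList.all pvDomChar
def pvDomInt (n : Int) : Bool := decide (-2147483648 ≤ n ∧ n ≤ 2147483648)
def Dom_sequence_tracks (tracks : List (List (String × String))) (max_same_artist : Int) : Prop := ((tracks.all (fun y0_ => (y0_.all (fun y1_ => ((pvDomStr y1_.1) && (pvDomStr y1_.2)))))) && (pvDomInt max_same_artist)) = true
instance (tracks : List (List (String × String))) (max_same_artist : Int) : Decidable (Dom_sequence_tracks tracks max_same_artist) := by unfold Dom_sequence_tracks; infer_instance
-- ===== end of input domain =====

-- B replaces A's quadratic rescans of `remaining` by per-artist FIFO queues built once,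
-- picking each step the minimum-position eligible queue head (alternative decomposition).

-- t.get(key, "")
def pvGet (t : List (String × String)) (k : String) : String :=
  (PySem.Dict.mk t).getD k ""

-- ===== PORT A =====
-- album-cap filter loop of A (Counter + append)
def stepFilterA (s : PySem.Dict String Int × List (List (String × String)))
    (t : List (String × String)) :
    PySem.Dict String Int × List (List (String × String)) :=
  let album := pvGet t "album"
  if album ≠ "" ∧ s.1.getD album 0 ≥ 2 then s
  else (s.1.modify album 0 (· + 1), s.2 ++ [t])

-- A's inner `for i, track in enumerate(remaining)` with `remaining.pop(i)` on the first hit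
def findA (rem : List (List (String × String))) (window : List String)
    (acc : List (List (String × String))) :
    Option (List (String × String) × String × List (List (String × String))) :=
  match rem with
  | [] => none
  | t :: rest =>
    let artist := pvGet t "artist"
    if window.contains artist then findA rest window (acc ++ [t])
    else some (t, artist, acc ++ rest)

-- length fact needed for loopA's termination
theorem findA_len (rem : List (List (String × String))) (window : List String)
    (acc : List (List (String × String))) (t : List (String × String)) (a : String)
    (rest : List (List (String × String)))
    (h : findA rem window acc = some (t, a, rest)) :
    rest.length + 1 = acc.length + rem.length := by
  induction rem generalizing acc with
  | nil => simp [findA] at h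
  | cons x xs ih =>
    simp only [findA] at h
    split at h
    · have := ih _ h; simp at this ⊢; omega
    · obtain ⟨rfl, rfl, rfl⟩ := by simpa using h
      simp; omega

-- the selection of one step of A's while-loop: the found eligible track, or the fallback pop(0)
def popA (rem : List (List (String × String))) (window : List String) :
    List (String × String) × String × List (List (String × String)) :=
  match findA rem window [] with
  | some r => r
  | none => (rem.headD [], pvGet (rem.headD []) "artist", rem.tail)

theorem popA_len (rem : List (List (String × String))) (window : List String)
    (h : rem ≠ []) : (popA rem window).2.2.length + 1 = rem.length := by
  unfold popA
  cases hf : findA rem window [] with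
  | some r =>
    obtain ⟨t, a, rest⟩ := r
    have := findA_len _ _ _ _ _ _ hf
    simpa using this
  | none => cases rem with
    | nil => exact absurd rfl h
    | cons x xs => simp

-- A's `while remaining:` loop
def loopA (remaining : List (List (String × String))) (recent : List String)
    (result : List (List (String × String))) (k : Int) : List (List (String × String)) :=
  match remaining with
  | [] => result
  | t0 :: rest0 =>
    let p := popA (t0 :: rest0) (PySem.List.slice recent (some (-k)) none)
    loopA p.2.2 (recent ++ [p.2.1]) (result ++ [p.1]) k
termination_by remaining.length
decreasing_by
  have := popA_len (t0 :: rest0) (PySem.List.slice recent (some (-k)) none) (by simp)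
  simp at this ⊢
  omega

def sequence_tracks (tracks : List (List (String × String))) (max_same_artist : Int) :
    List (List (String × String)) :=
  if tracks.length ≤ 3 then tracks
  else
    let filtered := (tracks.foldl stepFilterA (PySem.Dict.empty, [])).2
    loopA filtered [] [] max_same_artist

-- ===== PORT B =====
-- album-cap filter loop of B (plain dict get/insert)
def stepFilterB (s : PySem.Dict String Int × List (List (String × String)))
    (t : List (String × String)) :
    PySem.Dict String Int × List (List (String × String)) :=
  let album := pvGet t "album"
  let c := s.1.getD album 0
  if album ≠ "" ∧ c ≥ 2 then s
  else (s.1.insert album (c + 1), s.2 ++ [t])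

-- `queues.setdefault(artist, []).append((pos, t))` over enumerate(filtered)
def buildQueues (filtered : List (List (String × String))) :
    PySem.Dict String (List (Int × List (String × String))) :=
  (PySem.List.enumerate filtered 0).foldl
    (fun d p => d.modify (pvGet p.2 "artist") [] (· ++ [p])) PySem.Dict.empty

-- B's `for artist, q in queues.items():` computing (best, first)
def scanHeads (items : List (String × List (Int × List (String × String))))
    (window : List String)
    (bf : Option (Int × String) × Option (Int × String)) :
    Option (Int × String) × Option (Int × String) :=
  match items with
  | [] => bf
  | (artist, q) :: rest =>
    match q with
    | [] => scanHeads rest window bf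
    | (pos, _) :: _ =>
      let first := match bf.2 with
        | none => some (pos, artist)
        | some f => if pos < f.1 then some (pos, artist) else some f
      let best := if window.contains artist then bf.1
        else match bf.1 with
          | none => some (pos, artist)
          | some b => if pos < b.1 then some (pos, artist) else some b
      scanHeads rest window (best, first)

-- B's `while n:` loop (n counts the tracks still queued)
def loopB (queues : PySem.Dict String (List (Int × List (String × String))))
    (recent : List String) (result : List (List (String × String))) (k : Int) :
    Nat → List (List (String × String))
  | 0 => result
  | n + 1 =>
    let window := PySem.List.slice recent (some (-k)) none
    let bf := scanHeads queues.items window (none, none)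
    match (match bf.1 with | some b => some b | none => bf.2) with
    | none => result      -- unreachable: some queue is nonempty whenever n > 0
    | some (_, artist) =>
      match queues.getD artist [] with
      | [] => result      -- unreachable for the same reason
      | (_, t) :: qrest =>
        loopB (queues.insert artist qrest) (recent ++ [artist]) (result ++ [t]) k n

def sequence_tracks_alt (tracks : List (List (String × String))) (max_same_artist : Int) :
    List (List (String × String)) :=
  if tracks.length ≤ 3 then tracks
  else
    let filtered := (tracks.foldl stepFilterB (PySem.Dict.empty, [])).2
    loopB (buildQueues filtered) [] [] max_same_artist filtered.length

-- ===== PRECONDITION & SPEC =====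
def Spec_sequence_tracks (tracks : List (List (String × String))) (max_same_artist : Int) (out : List (List (String × String))) : Prop := out = sequence_tracks_alt tracks max_same_artist
instance (tracks : List (List (String × String))) (max_same_artist : Int) (out : List (List (String × String))) : Decidable (Spec_sequence_tracks tracks max_same_artist out) := by unfold Spec_sequence_tracks; infer_instance

-- ===== CLAIM (what is proved, stated in full; the proofs are below) =====
def Claim_equal_sequence_tracks : Prop := ∀ (tracks : List (List (String × String))) (max_same_artist : Int), Dom_sequence_tracks tracks max_same_artist → Spec_sequence_tracks tracks max_same_artist (sequence_tracks tracks max_same_artist)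

-- ===== LEMMAS AND PROOFS =====

theorem stepFilter_eq : stepFilterA = stepFilterB := by
  funext s t
  simp only [stepFilterA, stepFilterB, PySem.Dict.modify]

-- key of an enumerated track
def keyOf (p : Int × List (String × String)) : String := pvGet p.2 "artist"

-- the (position, artist) heads of the queues
def headsOf (items : List (String × List (Int × List (String × String)))) :
    List (Int × String) :=
  items.filterMap (fun pr => match pr.2 with
    | [] => none
    | (pos, _) :: _ => some (pos, pr.1))

-- running strict first-wins minimum by position
def minp (o : Option (Int × String)) (hs : List (Int × String)) : Option (Int × String) :=
  hs.foldl (fun o h => match o with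
    | none => some h
    | some b => if h.1 < b.1 then some h else some b) o

-- queues dict d represents the enumerated remaining list e
def QInv (d : PySem.Dict String (List (Int × List (String × String))))
    (e : List (Int × List (String × String))) : Prop :=
  d.keys.Nodup ∧
  (∀ pr ∈ d.items, pr.2 = e.filter (fun p => keyOf p == pr.1)) ∧
  (∀ p ∈ e, d.contains (keyOf p) = true)

theorem scanHeads_eq (items : List (String × List (Int × List (String × String))))
    (w : List String) (b f : Option (Int × String)) :
    scanHeads items w (b, f) =
      (minp b ((headsOf items).filter (fun h => !(w.contains h.2))), minp f (headsOf items)) := by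
  induction items generalizing b f with
  | nil => rfl
  | cons pr rest ih =>
    obtain ⟨artist, q⟩ := pr
    cases q with
    | nil => simp only [scanHeads, headsOf, List.filterMap_cons]; exact ih b f
    | cons h0 q' =>
      obtain ⟨pos, x⟩ := h0
      simp only [scanHeads, headsOf, List.filterMap_cons, List.filter_cons]
      by_cases hw : artist ∈ w
      · rw [ih]
        simp [headsOf, minp, hw]
      · rw [ih]
        simp [headsOf, minp, hw]


theorem minp_keep (hs : List (Int × String)) (b : Int × String)
    (h : ∀ x ∈ hs, ¬ (x.1 < b.1)) : minp (some b) hs = some b := by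
  induction hs with
  | nil => rfl
  | cons x xs ih =>
    have hx := h x (by simp)
    simp only [minp, List.foldl_cons]
    rw [if_neg hx]
    exact ih (fun y hy => h y (by simp [hy]))


theorem minp_some_spec (hs : List (Int × String)) (b m : Int × String)
    (hm : m ∈ hs) (hb : m.1 < b.1) (hlt : ∀ x ∈ hs, x = m ∨ m.1 < x.1) :
    minp (some b) hs = some m := by
  induction hs generalizing b with
  | nil => simp at hm
  | cons x xs ih =>
    simp only [minp, List.foldl_cons]
    by_cases hxm : x = m
    · subst hxm
      rw [if_pos hb]
      exact minp_keep xs x (fun y hy => by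
        rcases hlt y (by simp [hy]) with rfl | h'
        · omega
        · omega)
    · have hmx : m.1 < x.1 := by
        rcases hlt x (by simp) with h' | h'
        · exact absurd h' hxm
        · exact h'
      have hm' : m ∈ xs := by
        rcases List.mem_cons.mp hm with rfl | h'
        · exact absurd rfl hxm
        · exact h'
      split
      · exact ih x hm' hmx (fun y hy => hlt y (by simp [hy]))
      · exact ih b hm' hb (fun y hy => hlt y (by simp [hy]))


theorem minp_none_spec (hs : List (Int × String)) (m : Int × String)
    (hm : m ∈ hs) (hlt : ∀ x ∈ hs, x = m ∨ m.1 < x.1) :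
    minp none hs = some m := by
  cases hs with
  | nil => simp at hm
  | cons x xs =>
    simp only [minp, List.foldl_cons]
    by_cases hxm : x = m
    · subst hxm
      exact minp_keep xs x (fun y hy => by
        rcases hlt y (by simp [hy]) with rfl | h' <;> omega)
    · have hmx : m.1 < x.1 := by
        rcases hlt x (by simp) with h' | h'
        · exact absurd h' hxm
        · exact h'
      have hm' : m ∈ xs := by
        rcases List.mem_cons.mp hm with rfl | h'
        · exact absurd rfl hxm
        · exact h'
      exact minp_some_spec xs x m hm' hmx (fun y hy => hlt y (by simp [hy]))


theorem findA_none (rem : List (List (String × String))) (w : List String)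
    (acc : List (List (String × String)))
    (h : ∀ t ∈ rem, w.contains (pvGet t "artist") = true) :
    findA rem w acc = none := by
  induction rem generalizing acc with
  | nil => rfl
  | cons t rest ih =>
    simp only [findA]
    rw [if_pos (h t (by simp))]
    exact ih _ (fun t' ht' => h t' (by simp [ht']))


theorem findA_some (u v : List (List (String × String))) (x : List (String × String))
    (w : List String) (acc : List (List (String × String)))
    (hu : ∀ t ∈ u, w.contains (pvGet t "artist") = true)
    (hx : w.contains (pvGet x "artist") = false) :
    findA (u ++ x :: v) w acc = some (x, pvGet x "artist", acc ++ (u ++ v)) := by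
  induction u generalizing acc with
  | nil =>
    simp only [List.nil_append, findA]
    rw [if_neg (by simpa using hx)]
  | cons t u' ih =>
    simp only [List.cons_append, findA]
    rw [if_pos (hu t (by simp))]
    rw [ih (acc ++ [t]) (fun t' ht' => hu t' (by simp [ht']))]
    simp


theorem getD_build (l : List (Int × List (String × String)))
    (d : PySem.Dict String (List (Int × List (String × String)))) (a : String) :
    (l.foldl (fun d p => d.modify (keyOf p) [] (· ++ [p])) d).getD a [] =
      d.getD a [] ++ l.filter (fun p => keyOf p == a) := by
  induction l generalizing d with
  | nil => simp
  | cons p l' ih =>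
    simp only [List.foldl_cons, List.filter_cons]
    rw [ih]
    by_cases hk : keyOf p = a
    · rw [PySem.Dict.getD_modify]
      simp [hk]
    · rw [PySem.Dict.getD_modify]
      simp [hk, beq_iff_eq]
      intro h
      exact absurd h.symm hk


-- H1: the first track of artist a in e is the head of a's queue, hence a member of headsOf
theorem mem_headsOf (d : PySem.Dict String (List (Int × List (String × String))))
    (e u v : List (Int × List (String × String))) (x : Int × List (String × String))
    (hinv : QInv d e) (he : e = u ++ x :: v)
    (hu : ∀ q ∈ u, keyOf q ≠ keyOf x) :
    (x.1, keyOf x) ∈ headsOf d.items ∧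
      d.getD (keyOf x) [] = x :: v.filter (fun p => keyOf p == keyOf x) := by
  obtain ⟨hnd, hitems, hcont⟩ := hinv
  have hc : d.contains (keyOf x) = true := hcont x (by simp [he])
  rw [PySem.Dict.contains_eq_isSome_get?] at hc
  obtain ⟨q, hq⟩ := Option.isSome_iff_exists.mp hc
  have hmem : (keyOf x, q) ∈ d.items := PySem.Dict.mem_items_of_get?_eq_some _ hq
  have hqv : q = e.filter (fun p => keyOf p == keyOf x) := hitems _ hmem
  have hufil : u.filter (fun p => keyOf p == keyOf x) = [] :=
    List.filter_eq_nil_iff.mpr (fun p hp => by simpa using hu p hp)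
  have hfil : e.filter (fun p => keyOf p == keyOf x)
      = x :: v.filter (fun p => keyOf p == keyOf x) := by
    rw [he, List.filter_append, hufil, List.filter_cons]
    simp
  have hq' : q = x :: v.filter (fun p => keyOf p == keyOf x) := by rw [hqv, hfil]
  constructor
  · apply List.mem_filterMap.mpr
    exact ⟨(keyOf x, q), hmem, by rw [hq']⟩
  · rw [PySem.Dict.getD_of_mem_items d hmem hnd []]
    exact hq'

-- H2: every member of headsOf is the first track of its artist in e
theorem headsOf_mem (d : PySem.Dict String (List (Int × List (String × String))))
    (e : List (Int × List (String × String))) (h : Int × String)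
    (hinv : QInv d e) (hh : h ∈ headsOf d.items) :
    ∃ u p v, e = u ++ p :: v ∧ h = (p.1, keyOf p) ∧ ∀ q ∈ u, keyOf q ≠ keyOf p := by
  obtain ⟨hnd, hitems, hcont⟩ := hinv
  obtain ⟨pr, hpr, hf⟩ := List.mem_filterMap.mp hh
  have hq := hitems pr hpr
  cases hq2 : pr.2 with
  | nil => rw [hq2] at hf; simp at hf
  | cons p0 rest =>
    rw [hq2] at hf
    obtain ⟨pos, t⟩ := p0
    simp only [Option.some_inj] at hf
    subst hf
    have : e.filter (fun p => keyOf p == pr.1) = (pos, t) :: rest := by rw [← hq, hq2]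
    obtain ⟨l₁, l₂, hel, hl₁, hp, -⟩ := List.filter_eq_cons_iff.mp this
    have hkey : keyOf (pos, t) = pr.1 := by simpa using hp
    refine ⟨l₁, (pos, t), l₂, hel, by simp [hkey], ?_⟩
    intro q hq'
    have := hl₁ q hq'
    simp [hkey] at this ⊢
    exact this

-- QInv is preserved by popping the first track of artist (keyOf x)
theorem QInv_step (d : PySem.Dict String (List (Int × List (String × String))))
    (e u v : List (Int × List (String × String))) (x : Int × List (String × String))
    (hinv : QInv d e) (he : e = u ++ x :: v)
    (hu : ∀ q ∈ u, keyOf q ≠ keyOf x) :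
    QInv (d.insert (keyOf x) (v.filter (fun p => keyOf p == keyOf x))) (u ++ v) := by
  obtain ⟨hnd, hitems, hcont⟩ := hinv
  have hc : d.contains (keyOf x) = true := hcont x (by simp [he])
  refine ⟨?_, ?_, ?_⟩
  · rw [PySem.Dict.keys_insert_of_contains _ _ hc]; exact hnd
  · intro pr hpr
    rw [PySem.Dict.items_insert_of_contains _ _ hc] at hpr
    obtain ⟨pr0, hpr0, hpr'⟩ := List.mem_map.mp hpr
    by_cases hk : (pr0.1 == keyOf x) = true
    · rw [if_pos hk] at hpr'
      subst hpr'
      have hufil : u.filter (fun p => keyOf p == keyOf x) = [] :=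
        List.filter_eq_nil_iff.mpr (fun p hp => by simpa using hu p hp)
      simp only [List.filter_append, hufil, List.nil_append]
    · rw [if_neg hk] at hpr'
      subst hpr'
      rw [hitems pr0 hpr0, he]
      have hxf : (keyOf x == pr0.1) = false := by
        by_cases h' : keyOf x = pr0.1
        · exact absurd (by simp [h']) hk
        · simp [h']
      simp [List.filter_append, hxf]
  · intro p hp
    rw [PySem.Dict.contains_insert]
    have : d.contains (keyOf p) = true := hcont p (by
      rcases List.mem_append.mp hp with h' | h'
      · exact by simp [he, h']
      · exact by simp [he, h'])
    simp [this]

theorem loop_eq (k : Int) : ∀ (n : Nat) (e : List (Int × List (String × String)))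
    (d : PySem.Dict String (List (Int × List (String × String))))
    (recent : List String) (result : List (List (String × String))),
    e.length = n → e.Pairwise (fun p q => p.1 < q.1) → QInv d e →
    loopA (e.map (·.2)) recent result k = loopB d recent result k n := by
  intro n
  induction n with
  | zero =>
    intro e d recent result hlen _ _
    rw [List.length_eq_zero_iff.mp hlen]
    simp [loopA, loopB]
  | succ n ih =>
    intro e d recent result hlen hpw hinv
    obtain ⟨x0, e0, rfl⟩ : ∃ x0 e0, e = x0 :: e0 := by
      cases e with
      | nil => simp at hlen
      | cons a b => exact ⟨a, b, rfl⟩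
    have hlen0 : e0.length = n := by simpa using hlen
    -- both sides look at the same window
    set w : List String := PySem.List.slice recent (some (-k)) none with hwdef
    have hBheads := scanHeads_eq d.items w none none
    cases hfind : (x0 :: e0).find? (fun p => !(w.contains (keyOf p))) with
    | some x =>
      obtain ⟨hpx, u, v, he, hu⟩ := List.find?_eq_some_iff_append.mp hfind
      have hxe : w.contains (keyOf x) = false := by simpa using hpx
      have hub : ∀ q ∈ u, w.contains (keyOf q) = true := by
        intro q hq; simpa using hu q hq
      have hune : ∀ q ∈ u, keyOf q ≠ keyOf x := by
        intro q hq heq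
        rw [← heq] at hxe
        rw [hub q hq] at hxe
        exact absurd hxe (by simp)
      obtain ⟨hheads, hgetD⟩ := mem_headsOf d _ u v x hinv he hune
      -- A side: findA finds x
      have hA : findA ((x0 :: e0).map (·.2)) w [] = some (x.2, pvGet x.2 "artist", (u ++ v).map (·.2)) := by
        rw [he]
        have : (u ++ x :: v).map (·.2) = u.map (·.2) ++ x.2 :: v.map (·.2) := by simp
        rw [this]
        rw [findA_some (u.map (·.2)) (v.map (·.2)) x.2 w []
          (fun t ht => by
            obtain ⟨q, hq, rfl⟩ := List.mem_map.mp ht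
            exact hub q hq)
          hxe]
        simp
      -- B side: best = some (x.1, keyOf x)
      have hbest : minp none ((headsOf d.items).filter (fun h => !(w.contains h.2))) = some (x.1, keyOf x) := by
        apply minp_none_spec
        · exact List.mem_filter.mpr ⟨hheads, by simpa using hxe⟩
        · intro h hh
          obtain ⟨hh', helig⟩ := List.mem_filter.mp hh
          obtain ⟨u', p, v', he', hpdef, -⟩ := headsOf_mem d _ h hinv hh'
          have hpe : p ∈ (x0 :: e0) := by rw [he']; simp
          rw [he] at hpe
          rcases List.mem_append.mp hpe with hpu | hpxv
          · -- p blocked but eligible: contradiction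
            have := hub p hpu
            rw [hpdef] at helig
            simp at helig
            exact absurd (by simpa using this) helig
          · rcases List.mem_cons.mp hpxv with heq | hpv
            · left; rw [hpdef, heq]
            · right
              rw [hpdef]
              have hpw' := hpw
              rw [he] at hpw'
              obtain ⟨-, hpw2, -⟩ := List.pairwise_append.mp hpw'
              exact (List.pairwise_cons.mp hpw2).1 p hpv
      -- step both loops
      rw [show ((x0 :: e0).map (·.2)) = x0.2 :: e0.map (·.2) by simp]
      rw [loopA]
      simp only [loopB]
      rw [← hwdef]
      have hxmap : x0.2 :: e0.map (·.2) = (x0 :: e0).map (·.2) := by simp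
      rw [show popA (x0.2 :: e0.map (·.2)) w = (x.2, pvGet x.2 "artist", (u ++ v).map (·.2)) by
        unfold popA; rw [hxmap, hA]]
      rw [hBheads, hbest]
      simp only []
      rw [hgetD]
      have hpw' : (u ++ v).Pairwise (fun p q => p.1 < q.1) := by
        refine List.Pairwise.sublist ?_ hpw
        rw [he]
        exact List.Sublist.append_left (List.sublist_cons_self x v) u
      have hlen' : (u ++ v).length = n := by
        have : (u ++ x :: v).length = n + 1 := by rw [← he]; simpa using hlen
        simp at this ⊢
        omega
      have := ih (u ++ v) (d.insert (keyOf x) (v.filter (fun p => keyOf p == keyOf x)))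
        (recent ++ [keyOf x]) (result ++ [x.2]) hlen' hpw'
        (QInv_step d _ u v x hinv he hune)
      exact this
    | none =>
      have hall : ∀ p ∈ (x0 :: e0), w.contains (keyOf p) = true := by
        intro p hp
        have := List.find?_eq_none.mp hfind p hp
        simpa using this
      -- A side: findA returns none
      have hA : findA ((x0 :: e0).map (·.2)) w [] = none := by
        apply findA_none
        intro t ht
        obtain ⟨q, hq, rfl⟩ := List.mem_map.mp ht
        exact hall q hq
      obtain ⟨hheads, hgetD⟩ := mem_headsOf d _ [] e0 x0 hinv rfl (by simp)
      have hfilnil : (headsOf d.items).filter (fun h => !(w.contains h.2)) = [] := by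
        apply List.filter_eq_nil_iff.mpr
        intro h hh
        obtain ⟨u', p, v', he', hpdef, -⟩ := headsOf_mem d _ h hinv hh
        have hpe : p ∈ (x0 :: e0) := by rw [he']; simp
        rw [hpdef]
        simp only [Bool.not_eq_true', Bool.not_eq_false]
        exact hall p hpe
      have hfirst : minp none (headsOf d.items) = some (x0.1, keyOf x0) := by
        apply minp_none_spec _ _ hheads
        intro h hh
        obtain ⟨u', p, v', he', hpdef, -⟩ := headsOf_mem d _ h hinv hh
        have hpe : p ∈ (x0 :: e0) := by rw [he']; simp
        rcases List.mem_cons.mp hpe with heq | hpv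
        · left; rw [hpdef, heq]
        · right
          rw [hpdef]
          exact (List.pairwise_cons.mp hpw).1 p hpv
      rw [show ((x0 :: e0).map (·.2)) = x0.2 :: e0.map (·.2) by simp]
      rw [loopA]
      simp only [loopB]
      rw [← hwdef]
      have hxmap : x0.2 :: e0.map (·.2) = (x0 :: e0).map (·.2) := by simp
      rw [show popA (x0.2 :: e0.map (·.2)) w = (x0.2, pvGet x0.2 "artist", e0.map (·.2)) by
        unfold popA; rw [hxmap, hA]; simp]
      rw [hBheads, hfilnil, hfirst]
      simp only [minp, List.foldl_nil]
      rw [hgetD]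
      have := ih e0 (d.insert (keyOf x0) (e0.filter (fun p => keyOf p == keyOf x0)))
        (recent ++ [keyOf x0]) (result ++ [x0.2]) hlen0 ((List.pairwise_cons.mp hpw).2)
        (QInv_step d _ [] e0 x0 hinv rfl (by simp))
      exact this

theorem QInv_build (filtered : List (List (String × String))) :
    QInv (buildQueues filtered) (PySem.List.enumerate filtered 0) := by
  have hb : buildQueues filtered = (PySem.List.enumerate filtered 0).foldl
      (fun d p => d.modify (keyOf p) [] (· ++ [p])) PySem.Dict.empty := rfl
  have hnd : (buildQueues filtered).keys.Nodup := by
    rw [hb]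
    exact PySem.Dict.nodup_keys_foldl_modify_key _ keyOf [] (fun _ p q => q ++ [p]) _
      (by rw [PySem.Dict.keys_empty]; exact List.nodup_nil)
  refine ⟨hnd, ?_, ?_⟩
  · intro pr hpr
    obtain ⟨a, q⟩ := pr
    have h1 := PySem.Dict.getD_of_mem_items _ hpr hnd []
    rw [hb, getD_build] at h1
    simp only [PySem.Dict.getD_empty, List.nil_append] at h1
    exact h1.symm
  · intro p hp
    rw [PySem.Dict.contains_iff_mem_keys, hb, PySem.Dict.keys_foldl_modify_key]
    have : keyOf p ∈ (PySem.List.enumerate filtered 0).map keyOf := List.mem_map_of_mem hp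
    exact (PySem.Set.mem_update _ _ _).mpr (Or.inr this)

theorem main_eq (tracks : List (List (String × String))) (k : Int) :
    sequence_tracks tracks k = sequence_tracks_alt tracks k := by
  unfold sequence_tracks sequence_tracks_alt
  split
  · rfl
  · rw [stepFilter_eq]
    set filtered := (tracks.foldl stepFilterB (PySem.Dict.empty, [])).2 with hf
    have h1 : (PySem.List.enumerate filtered 0).map (·.2) = filtered :=
      PySem.List.map_snd_enumerate filtered 0
    have h2 : (PySem.List.enumerate filtered 0).length = filtered.length :=
      PySem.List.length_enumerate filtered 0
    have h3 := PySem.List.pairwise_lt_enumerate filtered (0 : Int)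
    calc loopA filtered [] [] k
        = loopA ((PySem.List.enumerate filtered 0).map (·.2)) [] [] k := by rw [h1]
      _ = loopB (buildQueues filtered) [] [] k filtered.length := by
          exact loop_eq k filtered.length _ _ [] [] h2 h3 (QInv_build filtered)

-- ===== VERDICT (by name: the statement is the Claim_ definition above) =====
theorem sequence_tracks_spec : Claim_equal_sequence_tracks := by
  intro tracks k _
  exact main_eq tracks k
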